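-- pv_equiv track=rewrite | github.com/Krissuper11/Python | TK/tk_example/exam.py | workday_count
-- ===== SOURCE A (Python) =====
-- def workday_count(days):
--     """
--     Given number of days.
--
--     Return how many of these days are workdays.
--     Workdays are first five days of the weeks, last two are not.
--     Always start from the start of the week.
--
--     :param days:
--     :return: workdays in given days
--     """
--     counter = 1
--     workdays = 0
--     for i in range(days):
--         if 1 <= counter <= 5:
--             workdays += 1
--         elif counter >= 7:
--             counter -= 7
--         counter += 1
--     return workdays
-- ===== SOURCE B (Python) =====
-- def workday_count(days):
--     """Closed-form: each full week contributes 5 workdays; the remainder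
--     contributes at most 5. O(1) instead of A's O(days) loop."""
--     if days <= 0:
--         return 0
--     return 5 * (days // 7) + min(days % 7, 5)
-- ===== Notes on version B (the rewrite author's own statement) =====
-- stated objective: faster
-- what changed: Replaced A's day-by-day counter loop with the closed form 5*(days//7) + min(days%7, 5).
import Mathlib
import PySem

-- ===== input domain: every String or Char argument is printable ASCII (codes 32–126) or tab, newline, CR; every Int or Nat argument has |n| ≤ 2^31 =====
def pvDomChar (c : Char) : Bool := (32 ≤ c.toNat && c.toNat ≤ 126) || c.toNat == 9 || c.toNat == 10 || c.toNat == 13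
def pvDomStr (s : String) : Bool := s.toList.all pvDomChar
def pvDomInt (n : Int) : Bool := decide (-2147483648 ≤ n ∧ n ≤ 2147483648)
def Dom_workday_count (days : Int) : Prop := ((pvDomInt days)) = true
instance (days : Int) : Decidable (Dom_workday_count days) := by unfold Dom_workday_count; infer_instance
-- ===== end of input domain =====

-- B replaces A's day-by-day counter loop with the closed form 5*(days//7) + min(days%7, 5): O(1) instead of O(days).

-- ===== PORT A =====
def workday_count (days : Int) : Int :=
  ((PySem.List.pyRange 0 days 1).foldl
    (fun (st : Int × Int) _ =>
      let counter := st.1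
      let workdays := st.2
      if 1 ≤ counter ∧ counter ≤ 5 then (counter + 1, workdays + 1)
      else if counter ≥ 7 then (counter - 7 + 1, workdays)
      else (counter + 1, workdays))
    (1, 0)).2

-- ===== PORT B =====
def workday_count_alt (days : Int) : Int :=
  if days ≤ 0 then 0
  else 5 * PySem.Int.floordiv days 7 + min (PySem.Int.mod days 7) 5

-- ===== PRECONDITION & SPEC =====
def Spec_workday_count (days : Int) (out : Int) : Prop := out = workday_count_alt days
instance (days : Int) (out : Int) : Decidable (Spec_workday_count days out) := by unfold Spec_workday_count; infer_instance

-- ===== CLAIM (what is proved, stated in full; the proofs are below) =====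
def Claim_equal_workday_count : Prop := ∀ (days : Int), Dom_workday_count days → Spec_workday_count days (workday_count days)

-- ===== LEMMAS AND PROOFS =====

-- loop invariant: after n iterations the state is (n % 7 + 1, 5*(n/7) + min (n%7) 5)
theorem workday_loop_state (n : Nat) :
    (PySem.List.pyRange 0 (n : Int) 1).foldl
      (fun (st : Int × Int) _ =>
        let counter := st.1
        let workdays := st.2
        if 1 ≤ counter ∧ counter ≤ 5 then (counter + 1, workdays + 1)
        else if counter ≥ 7 then (counter - 7 + 1, workdays)
        else (counter + 1, workdays))
      (1, 0)
    = (((n % 7 : Nat) : Int) + 1, 5 * ((n / 7 : Nat) : Int) + min ((n % 7 : Nat) : Int) 5) := by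
  induction n with
  | zero => simp [PySem.List.pyRange_zero_nat]
  | succ n ih =>
    have h : (((n : Nat) : Int) + 1) = ((n + 1 : Nat) : Int) := by push_cast; ring
    rw [show ((n + 1 : Nat) : Int) = (n : Int) + 1 by push_cast; ring,
        PySem.List.pyRange_one_succ_right (by positivity), List.foldl_append, ih]
    simp only [List.foldl]
    split_ifs with h1 h2 <;>
      · refine Prod.ext ?_ ?_ <;> simp only [] <;> push_cast <;> omega

theorem workday_count_eq (days : Int) : workday_count days = workday_count_alt days := by
  unfold workday_count workday_count_alt
  by_cases h : days ≤ 0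
  · rw [PySem.List.pyRange_one_eq_nil h]
    simp [h]
  · push_neg at h
    have hd : days = ((days.toNat : Nat) : Int) := by omega
    rw [hd, workday_loop_state,
        PySem.Int.floordiv_eq_ediv_of_pos (a := ((days.toNat : Nat) : Int)) (by norm_num),
        PySem.Int.mod_eq_emod_of_pos (a := ((days.toNat : Nat) : Int)) (by norm_num)]
    split_ifs with h0
    · omega
    · push_cast
      omega

-- ===== VERDICT (by name: the statement is the Claim_ definition above) =====
theorem workday_count_spec : Claim_equal_workday_count := by
  intro days _
  exact workday_count_eq days
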